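-- pv_equiv track=rewrite | github.com/LucasConde22/TPs-TDA | Guías/Reducciones/5.py | validador_maximo
-- ===== SOURCE A (Python) =====
-- def validador_maximo(arreglo, max): # O(N)
--     esta = False
--     for num in arreglo:
--         if num > max:
--             return False
--         elif num == max:
--             esta = True
--     return esta
-- ===== SOURCE B (Python) =====
-- def validador_maximo(arreglo, max):
--     return max in arreglo and not any(num > max for num in arreglo)
-- ===== Notes on version B (the rewrite author's own statement) =====
-- stated objective: idiomatic
-- what changed: Replaced the single stateful loop with early return and an 'esta' flag by the conjunction of two independent passes: a membership test and a not-any(num > max) test.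
import Mathlib
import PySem

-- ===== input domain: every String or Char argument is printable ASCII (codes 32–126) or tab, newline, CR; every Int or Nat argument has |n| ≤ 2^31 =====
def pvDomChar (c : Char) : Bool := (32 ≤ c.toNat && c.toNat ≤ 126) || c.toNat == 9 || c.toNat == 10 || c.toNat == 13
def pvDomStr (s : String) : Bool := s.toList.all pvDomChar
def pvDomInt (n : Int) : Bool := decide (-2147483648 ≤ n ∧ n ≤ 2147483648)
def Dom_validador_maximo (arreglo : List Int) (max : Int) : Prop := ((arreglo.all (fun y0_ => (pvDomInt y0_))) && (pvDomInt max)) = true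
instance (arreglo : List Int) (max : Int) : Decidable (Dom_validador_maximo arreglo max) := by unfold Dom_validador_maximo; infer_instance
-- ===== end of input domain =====

-- B rewrites A's stateful early-return loop as two independent passes (membership and not-any); same O(n) cost.

-- ===== PORT A =====
-- the loop over arreglo with the 'esta' flag and early return on num > max
def vmLoop (max : Int) (esta : Bool) : List Int → Bool
  | [] => esta
  | num :: rest =>
      if num > max then false
      else if num == max then vmLoop max true rest
      else vmLoop max esta rest

def validador_maximo (arreglo : List Int) (max : Int) : Bool :=
  vmLoop max false arreglo

-- ===== PORT B =====
def validador_maximo_alt (arreglo : List Int) (max : Int) : Bool :=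
  arreglo.contains max && !(arreglo.any (fun num => num > max))

-- ===== PRECONDITION & SPEC =====
def Spec_validador_maximo (arreglo : List Int) (max : Int) (out : Bool) : Prop := out = validador_maximo_alt arreglo max
instance (arreglo : List Int) (max : Int) (out : Bool) : Decidable (Spec_validador_maximo arreglo max out) := by unfold Spec_validador_maximo; infer_instance

-- ===== CLAIM (what is proved, stated in full; the proofs are below) =====
def Claim_equal_validador_maximo : Prop := ∀ (arreglo : List Int) (max : Int), Dom_validador_maximo arreglo max → Spec_validador_maximo arreglo max (validador_maximo arreglo max)

-- ===== LEMMAS AND PROOFS =====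
theorem vmLoop_eq (max : Int) (l : List Int) :
    ∀ esta : Bool, vmLoop max esta l = ((esta || l.contains max) && !(l.any (fun num => num > max))) := by
  induction l with
  | nil => intro esta; simp [vmLoop]
  | cons num rest ih =>
      intro esta
      by_cases hgt : num > max
      · simp [vmLoop, hgt, List.any_cons]
      · by_cases heq : num = max
        · simp [vmLoop, hgt, heq, ih, List.any_cons]
        · have heq' : ¬ max = num := fun h => heq h.symm
          simp [vmLoop, hgt, heq, heq', ih, List.any_cons]

-- ===== VERDICT (by name: the statement is the Claim_ definition above) =====
theorem validador_maximo_spec : Claim_equal_validador_maximo := by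
  intro arreglo max _
  unfold Spec_validador_maximo validador_maximo validador_maximo_alt
  simp [vmLoop_eq]
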